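-- pv_equiv track=rewrite | github.com/racerandom/JaMIE | utils.py | explore_unk
-- ===== SOURCE A (Python) =====
-- def explore_unk(bpe_x, ori_x):
--
--     ix_count = 0
--     deunk_bpe_x = []
--
--     for tok in bpe_x:
--         if not tok.startswith('##'):
--             if tok != '[UNK]':
--                 deunk_bpe_x.append(tok)
--             else:
--                 deunk_bpe_x.append(ori_x[ix_count])
--             ix_count += 1
--         else:
--             deunk_bpe_x.append(tok)
--     assert len(bpe_x) == len(deunk_bpe_x)
--     return deunk_bpe_x
-- ===== SOURCE B (Python) =====
-- def explore_unk(bpe_x, ori_x):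
--     # pass 1: idxs[i] = number of non-'##' tokens strictly before position i
--     idxs = []
--     count = 0
--     for tok in bpe_x:
--         idxs.append(count)
--         if not tok.startswith('##'):
--             count += 1
--     # pass 2: substitute the original token only where a word-initial '[UNK]' sits
--     return [ori_x[i] if (not tok.startswith('##')) and tok == '[UNK]' else tok
--             for tok, i in zip(bpe_x, idxs)]
-- ===== Notes on version B (the rewrite author's own statement) =====
-- stated objective: alternative
-- what changed: Replaces the single stateful loop (running ix_count mutated while appending) by two passes: a prefix-count table idxs built first, then a stateless zip/map comprehension that substitutes ori_x[idxs[i]] exactly at word-initial '[UNK]' tokens.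
-- outside the precondition, e.g. on explore_unk(['[UNK]'], []): A raises IndexError, B raises IndexError
import Mathlib
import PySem

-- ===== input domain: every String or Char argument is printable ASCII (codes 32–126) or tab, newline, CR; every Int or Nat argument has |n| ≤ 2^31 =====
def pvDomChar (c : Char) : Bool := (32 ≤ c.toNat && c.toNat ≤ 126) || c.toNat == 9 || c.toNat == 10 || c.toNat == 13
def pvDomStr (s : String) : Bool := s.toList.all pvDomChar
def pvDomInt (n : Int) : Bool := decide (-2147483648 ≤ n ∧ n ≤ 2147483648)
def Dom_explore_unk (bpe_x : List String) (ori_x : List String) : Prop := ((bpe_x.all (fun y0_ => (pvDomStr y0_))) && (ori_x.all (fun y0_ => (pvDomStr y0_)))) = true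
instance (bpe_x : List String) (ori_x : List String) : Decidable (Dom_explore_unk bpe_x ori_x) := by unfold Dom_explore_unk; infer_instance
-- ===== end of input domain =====

-- ===== PORT A =====
-- B restates the single stateful loop as a prefix-count pass plus a stateless zip/map (objective: alternative).
-- Python's assert is trivially true (one element is appended per token) and is omitted.
-- out-of-range ori_x[ix] raises IndexError in Python; the port returns a "" default there, excluded by Pre_.
def explore_unk_loop (ori_x : List String) : List String → Int → List String
  | [], _ => []
  | tok :: rest, ix_count =>
    if ¬ PySem.Str.startswith tok "##" then
      if tok ≠ "[UNK]" then
        tok :: explore_unk_loop ori_x rest (ix_count + 1)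
      else
        (PySem.List.pyGet? ori_x ix_count).getD "" :: explore_unk_loop ori_x rest (ix_count + 1)
    else
      tok :: explore_unk_loop ori_x rest ix_count

def explore_unk (bpe_x : List String) (ori_x : List String) : List String :=
  explore_unk_loop ori_x bpe_x 0

-- ===== PORT B =====
-- pass 1 of Source B: idxs[i] = number of non-'##' tokens strictly before position i
def pvPrefixCounts : List String → Int → List Int
  | [], _ => []
  | tok :: rest, count =>
    count :: pvPrefixCounts rest (if ¬ PySem.Str.startswith tok "##" then count + 1 else count)

def explore_unk_alt (bpe_x : List String) (ori_x : List String) : List String :=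
  (bpe_x.zip (pvPrefixCounts bpe_x 0)).map (fun p =>
    if ¬ PySem.Str.startswith p.1 "##" ∧ p.1 = "[UNK]" then
      (PySem.List.pyGet? ori_x p.2).getD ""
    else
      p.1)

-- ===== PRECONDITION & SPEC =====
-- Pre_ excludes exactly the inputs where Python A raises IndexError: a word-initial '[UNK]'
-- whose word index reaches past the end of ori_x.
def Pre_explore_unk (bpe_x : List String) (ori_x : List String) : Prop :=
  ∀ i < bpe_x.length, bpe_x.getD i "" = "[UNK]" →
    (bpe_x.take i).countP (fun t => ! PySem.Str.startswith t "##") < ori_x.length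
instance (bpe_x : List String) (ori_x : List String) : Decidable (Pre_explore_unk bpe_x ori_x) := by
  unfold Pre_explore_unk; infer_instance
def pvWitness_explore_unk : List String × List String :=
  (["foo", "[UNK]", "##x"], ["alpha", "beta"])
def Spec_explore_unk (bpe_x : List String) (ori_x : List String) (out : List String) : Prop := out = explore_unk_alt bpe_x ori_x
instance (bpe_x : List String) (ori_x : List String) (out : List String) : Decidable (Spec_explore_unk bpe_x ori_x out) := by unfold Spec_explore_unk; infer_instance

-- ===== CLAIM (what is proved, stated in full; the proofs are below) =====
def Claim_equal_explore_unk : Prop := ∀ (bpe_x : List String) (ori_x : List String), Dom_explore_unk bpe_x ori_x → Pre_explore_unk bpe_x ori_x → Spec_explore_unk bpe_x ori_x (explore_unk bpe_x ori_x)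

-- ===== LEMMAS AND PROOFS =====
lemma explore_unk_loop_eq_zip (ori_x : List String) :
    ∀ (l : List String) (c : Int),
      explore_unk_loop ori_x l c =
        (l.zip (pvPrefixCounts l c)).map (fun p =>
          if ¬ PySem.Str.startswith p.1 "##" ∧ p.1 = "[UNK]" then
            (PySem.List.pyGet? ori_x p.2).getD ""
          else
            p.1)
  | [], c => rfl
  | tok :: rest, c => by
    by_cases h : PySem.Chars.startswith tok.toList ['#', '#'] = false
    · by_cases hu : tok = "[UNK]"
      · simp [explore_unk_loop, pvPrefixCounts, PySem.Str.startswith, PySem.Chars.startswith, hu,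
          explore_unk_loop_eq_zip ori_x rest (c + 1)]
      · simp [explore_unk_loop, pvPrefixCounts, PySem.Str.startswith, h, hu,
          explore_unk_loop_eq_zip ori_x rest (c + 1)]
    · simp only [Bool.not_eq_false] at h
      simp [explore_unk_loop, pvPrefixCounts, PySem.Str.startswith, h,
        explore_unk_loop_eq_zip ori_x rest c]

-- ===== VERDICT (by name: the statement is the Claim_ definition above) =====
theorem explore_unk_spec : Claim_equal_explore_unk := by
  intro bpe_x ori_x _ _
  unfold Spec_explore_unk explore_unk explore_unk_alt
  exact explore_unk_loop_eq_zip ori_x bpe_x 0
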